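-- pv_equiv track=rewrite | github.com/karikris/intermine314 | src/intermine314/service/service.py | _iter_identifier_batches
-- ===== SOURCE A (Python) =====
-- def _iter_clean_identifiers(identifiers):
--     for identifier in identifiers:
--         if identifier is None:
--             continue
--         value = str(identifier).strip()
--         if value:
--             yield value
--
-- def _iter_identifier_batches(identifiers, chunk_size):
--     batch = []
--     for value in _iter_clean_identifiers(identifiers):
--         batch.append(value)
--         if len(batch) >= chunk_size:
--             yield batch
--             batch = []
--     if batch:
--         yield batch
-- ===== SOURCE B (Python) =====
-- from itertools import islice
--
-- def _iter_clean_identifiers(identifiers):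
--     for identifier in identifiers:
--         if identifier is None:
--             continue
--         value = str(identifier).strip()
--         if value:
--             yield value
--
-- def _iter_identifier_batches(identifiers, chunk_size):
--     it = _iter_clean_identifiers(identifiers)
--     while True:
--         batch = list(islice(it, chunk_size))
--         if not batch:
--             break
--         yield batch
-- ===== Notes on version B (the rewrite author's own statement) =====
-- stated objective: idiomatic
-- what changed: Replaces the per-element append-and-length-test accumulator with itertools.islice pulling fixed-size slices from the cleaned-identifier iterator.
-- outside the precondition, e.g. on _iter_identifier_batches(['a', 'b'], 0): A returns [['a'], ['b']], B returns []; on _iter_identifier_batches(['a'], -1): A returns [['a']], B raises ValueError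
import Mathlib
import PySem

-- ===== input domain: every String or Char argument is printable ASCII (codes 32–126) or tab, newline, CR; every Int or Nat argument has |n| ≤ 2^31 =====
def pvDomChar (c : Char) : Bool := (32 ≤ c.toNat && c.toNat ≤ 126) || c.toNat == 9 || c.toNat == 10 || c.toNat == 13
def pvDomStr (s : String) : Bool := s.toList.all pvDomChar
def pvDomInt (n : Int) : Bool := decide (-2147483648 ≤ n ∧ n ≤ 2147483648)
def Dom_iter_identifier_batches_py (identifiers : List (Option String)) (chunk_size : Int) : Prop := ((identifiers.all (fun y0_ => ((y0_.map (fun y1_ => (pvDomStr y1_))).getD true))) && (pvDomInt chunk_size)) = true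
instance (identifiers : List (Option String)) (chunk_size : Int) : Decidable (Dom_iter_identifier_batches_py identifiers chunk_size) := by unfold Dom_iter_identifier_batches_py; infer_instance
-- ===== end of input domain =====

-- B replaces A's append-and-length-test accumulator with fixed-size slice pulling (islice):
-- a different decomposition of the same batching; equal return values for chunk_size ≥ 1.

-- ===== PORT A =====
-- shared helper: Python _iter_clean_identifiers, materialised as the list of values it yields
def iter_clean_identifiers_py (identifiers : List (Option String)) : List String :=
  identifiers.foldl (fun acc identifier =>
    match identifier with
    | none => acc
    | some s =>
      let value := PySem.Str.strip s
      if value ≠ "" then acc ++ [value] else acc) []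

def iter_identifier_batches_py (identifiers : List (Option String)) (chunk_size : Int) : List (List String) :=
  let st := (iter_clean_identifiers_py identifiers).foldl
    (fun (st : List String × List (List String)) value =>
      let batch := st.1 ++ [value]
      if (batch.length : Int) ≥ chunk_size then ([], st.2 ++ [batch]) else (batch, st.2))
    ([], [])
  if st.1 ≠ [] then st.2 ++ [st.1] else st.2

-- ===== PORT B =====
-- while True: batch = list(islice(it, chunk_size)); if not batch: break; yield batch
def pyChunksOf (chunk_size : Int) (xs : List String) : List (List String) :=
  let batch := xs.take chunk_size.toNat
  if h : batch = [] then []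
  else batch :: pyChunksOf chunk_size (xs.drop chunk_size.toNat)
termination_by xs.length
decreasing_by
  have hx : xs ≠ [] := by rintro rfl; simp [batch] at h
  have hn : chunk_size.toNat ≠ 0 := by intro h0; simp [batch, h0] at h
  rcases xs with _ | ⟨a, ys⟩
  · exact absurd rfl hx
  · simp; omega

def iter_identifier_batches_py_alt (identifiers : List (Option String)) (chunk_size : Int) : List (List String) :=
  pyChunksOf chunk_size (iter_clean_identifiers_py identifiers)

-- ===== PRECONDITION & SPEC =====
-- Pre_ excludes non-positive chunk_size, an unspecified corner no caller uses: A happens to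
-- yield singleton batches there, while B's islice yields nothing (0) or raises ValueError (negative).
def Pre_iter_identifier_batches_py (identifiers : List (Option String)) (chunk_size : Int) : Prop :=
  1 ≤ chunk_size
instance (identifiers : List (Option String)) (chunk_size : Int) : Decidable (Pre_iter_identifier_batches_py identifiers chunk_size) := by unfold Pre_iter_identifier_batches_py; infer_instance

def pvWitness_iter_identifier_batches_py : List (Option String) × Int := ([some "a", none, some " b "], 2)

def Spec_iter_identifier_batches_py (identifiers : List (Option String)) (chunk_size : Int) (out : List (List String)) : Prop := out = iter_identifier_batches_py_alt identifiers chunk_size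
instance (identifiers : List (Option String)) (chunk_size : Int) (out : List (List String)) : Decidable (Spec_iter_identifier_batches_py identifiers chunk_size out) := by unfold Spec_iter_identifier_batches_py; infer_instance

-- ===== CLAIM (what is proved, stated in full; the proofs are below) =====
def Claim_equal_iter_identifier_batches_py : Prop := ∀ (identifiers : List (Option String)) (chunk_size : Int), Dom_iter_identifier_batches_py identifiers chunk_size → Pre_iter_identifier_batches_py identifiers chunk_size → Spec_iter_identifier_batches_py identifiers chunk_size (iter_identifier_batches_py identifiers chunk_size)

-- ===== LEMMAS AND PROOFS =====

-- Loop invariant: running A's accumulator loop from a partial batch (shorter than chunk_size)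
-- and finalising equals emitting `out` then slicing the remaining stream batch-first.
theorem batches_loop_eq_chunks (n : Int) (hn : 1 ≤ n) :
    ∀ (xs batch : List String) (out : List (List String)),
      (batch.length : Int) < n →
      (let st := xs.foldl
          (fun (st : List String × List (List String)) value =>
            let b := st.1 ++ [value]
            if (b.length : Int) ≥ n then ([], st.2 ++ [b]) else (b, st.2))
          (batch, out)
       if st.1 ≠ [] then st.2 ++ [st.1] else st.2) = out ++ pyChunksOf n (batch ++ xs) := by
  intro xs
  induction xs with
  | nil =>
    intro batch out hlt
    simp only [List.foldl_nil, List.append_nil]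
    by_cases hb : batch = []
    · subst hb
      rw [pyChunksOf]
      simp
    · rw [pyChunksOf]
      have htake : batch.take n.toNat = batch := by
        apply List.take_of_length_le; omega
      have hdrop : batch.drop n.toNat = [] := by
        apply List.drop_eq_nil_of_le; omega
      rw [htake, hdrop]
      rw [pyChunksOf]
      simp [hb]
  | cons v rest ih =>
    intro batch out hlt
    simp only [List.foldl_cons]
    by_cases hge : ((batch ++ [v]).length : Int) ≥ n
    · have hlen : (batch ++ [v]).length = n.toNat := by
        simp at hge ⊢; omega
      rw [if_pos hge]
      rw [ih [] (out ++ [batch ++ [v]]) (by simpa using hn)]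
      have : pyChunksOf n (batch ++ v :: rest) = (batch ++ [v]) :: pyChunksOf n rest := by
        rw [pyChunksOf]
        have hx : batch ++ v :: rest = (batch ++ [v]) ++ rest := by simp
        rw [hx]
        have htake : ((batch ++ [v]) ++ rest).take n.toNat = batch ++ [v] := by
          rw [List.take_append_of_le_length (by omega)]
          exact List.take_of_length_le (by omega)
        have hdrop : ((batch ++ [v]) ++ rest).drop n.toNat = rest := by
          rw [List.drop_append_of_le_length (by omega)]
          simp [hlen]
        rw [htake, hdrop]
        simp
      rw [this]
      simp
    · rw [if_neg hge]
      rw [ih (batch ++ [v]) out (by omega)]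
      have hx : batch ++ v :: rest = (batch ++ [v]) ++ rest := by simp
      rw [hx]

-- ===== VERDICT (by name: the statement is the Claim_ definition above) =====
theorem iter_identifier_batches_py_spec : Claim_equal_iter_identifier_batches_py := by
  intro identifiers chunk_size _ hpre
  unfold Spec_iter_identifier_batches_py iter_identifier_batches_py iter_identifier_batches_py_alt
  have := batches_loop_eq_chunks chunk_size hpre (iter_clean_identifiers_py identifiers) [] []
    (by simpa using hpre)
  simpa using this
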